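-- pv_equiv track=rewrite | github.com/MMariya17/HTPerfomanceLabTest | task1/task1.py | circular_path
-- ===== SOURCE A (Python) =====
-- def circular_path(n, m):
--     if n <= 0 or m <= 0:
--         return ""
--
--     path = []
--     current = 1
--
--     while True:
--         path.append(current)
--         current = (current + m - 1) % n
--         if current == 0:
--             current = n
--         if current == 1:
--             break
--
--     return "".join(map(str, path))
-- ===== SOURCE B (Python) =====
-- def _gcd(a, b):
--     while b:
--         a, b = b, a % b
--     return a
--
--
-- def circular_path(n, m):
--     if n <= 0 or m <= 0:
--         return ""
--     s = m - 1
--     count = n // _gcd(n, s)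
--     return "".join(str((i * s) % n + 1) for i in range(count))
-- ===== Notes on version B (the rewrite author's own statement) =====
-- stated objective: alternative
-- what changed: Replaces A's while-loop simulation of stepping around the circle (with the %n-then-fix-0-to-n update and break-on-return-to-1) by computing the cycle length up front as n // gcd(n, m-1) via Euclid's algorithm and emitting each visited position with the closed form (i*(m-1)) % n + 1.
import Mathlib
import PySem

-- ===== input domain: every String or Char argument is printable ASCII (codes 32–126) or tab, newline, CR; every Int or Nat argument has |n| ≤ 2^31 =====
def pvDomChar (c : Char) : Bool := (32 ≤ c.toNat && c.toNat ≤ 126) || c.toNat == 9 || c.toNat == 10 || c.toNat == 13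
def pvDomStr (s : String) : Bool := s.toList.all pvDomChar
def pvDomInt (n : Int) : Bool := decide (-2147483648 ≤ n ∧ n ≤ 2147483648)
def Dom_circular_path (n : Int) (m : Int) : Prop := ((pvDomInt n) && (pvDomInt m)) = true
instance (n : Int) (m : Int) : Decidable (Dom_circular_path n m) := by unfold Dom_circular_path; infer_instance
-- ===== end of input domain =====

-- B replaces A's step-by-step circle simulation by a gcd-determined cycle length and a
-- closed-form position for each step (alternative decomposition; same asymptotic cost).

-- ===== PORT A =====
-- 'while True' loop of A; the Nat argument is pure fuel (the loop provably stops after at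
-- most n iterations, so the port passes n.toNat fuel and the proof shows it never runs out).
def circPathLoopA (n m : Int) : Nat → Int → List Int → List Int
  | 0, _, acc => acc
  | fuel+1, current, acc =>
    let acc' := acc ++ [current]
    let c1 := PySem.Int.mod (current + m - 1) n
    let c2 := if c1 = 0 then n else c1
    if c2 = 1 then acc' else circPathLoopA n m fuel c2 acc'

def circular_path (n : Int) (m : Int) : String :=
  if n ≤ 0 ∨ m ≤ 0 then ""
  else PySem.Str.join "" ((circPathLoopA n m n.toNat 1 []).map PySem.Int.toStr)

-- ===== PORT B =====
-- B's hand-written Euclid gcd ('while b: a, b = b, a % b'); Python % via PySem.Int.mod.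
def pyGcdB (a b : Int) : Int :=
  if hb : b = 0 then a else pyGcdB b (PySem.Int.mod a b)
termination_by b.natAbs
decreasing_by
  rcases lt_trichotomy b 0 with hlt | heq | hgt
  · have h1 := PySem.Int.mod_neg_bounds a hlt
    omega
  · exact absurd heq hb
  · have h1 := PySem.Int.mod_nonneg a hgt
    have h2 := PySem.Int.mod_lt a hgt
    omega

def circular_path_alt (n : Int) (m : Int) : String :=
  if n ≤ 0 ∨ m ≤ 0 then ""
  else
    let s := m - 1
    let count := PySem.Int.floordiv n (pyGcdB n s)
    PySem.Str.join ""
      ((PySem.List.pyRange 0 count 1).map (fun i => PySem.Int.toStr (PySem.Int.mod (i * s) n + 1)))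

-- ===== PRECONDITION & SPEC =====
def Spec_circular_path (n : Int) (m : Int) (out : String) : Prop := out = circular_path_alt n m
instance (n : Int) (m : Int) (out : String) : Decidable (Spec_circular_path n m out) := by unfold Spec_circular_path; infer_instance

-- ===== CLAIM (what is proved, stated in full; the proofs are below) =====
def Claim_equal_circular_path : Prop := ∀ (n : Int) (m : Int), Dom_circular_path n m → Spec_circular_path n m (circular_path n m)

-- ===== LEMMAS AND PROOFS =====

-- B's Euclid loop computes Nat.gcd (on nonnegative inputs).
lemma pyGcdB_eq (k : Nat) : ∀ a b : Int, 0 ≤ a → 0 ≤ b → b.toNat ≤ k →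
    pyGcdB a b = (Nat.gcd b.toNat a.toNat : Int) := by
  induction k with
  | zero =>
    intro a b ha hb hk
    have hb0 : b = 0 := by omega
    subst hb0
    rw [pyGcdB]
    simp [ha]
  | succ k ih =>
    intro a b ha hb hk
    by_cases hb0 : b = 0
    · subst hb0
      rw [pyGcdB]
      simp [ha]
    · have hbpos : 0 < b := lt_of_le_of_ne hb (Ne.symm hb0)
      rw [pyGcdB]
      simp only [hb0, dite_false]
      have hmod : PySem.Int.mod a b = a % b := PySem.Int.mod_eq_emod_of_pos hbpos
      have hr0 : 0 ≤ a % b := Int.emod_nonneg a hb0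
      have hrlt : a % b < b := Int.emod_lt_of_pos a hbpos
      rw [hmod, ih b (a % b) hb hr0 (by omega)]
      congr 1
      have hcast : (a % b).toNat = a.toNat % b.toNat := by
        have h1 : ((a.toNat % b.toNat : Nat) : Int) = (a.toNat : Int) % (b.toNat : Int) :=
          Int.natCast_mod _ _
        have h2 : (a.toNat : Int) = a := Int.toNat_of_nonneg ha
        have h3 : (b.toNat : Int) = b := Int.toNat_of_nonneg hb
        rw [h2, h3] at h1
        omega
      rw [hcast, Nat.gcd_rec b.toNat a.toNat]

-- step lemma: A's "current" update sends position (j*s)%n + 1 to ((j+1)*s)%n + 1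
lemma circ_step (n s : Int) (hn : 0 < n) (j : Nat) :
    (if (((j : Int) * s % n + 1 + s) % n) = 0 then n else ((j : Int) * s % n + 1 + s) % n)
      = ((j : Int) + 1) * s % n + 1 := by
  have hy : ((j : Int) * s % n + s) % n = ((j : Int) + 1) * s % n := by
    rw [Int.emod_add_emod]
    ring_nf
  have hx : ((j : Int) * s % n + 1 + s) % n = (((j : Int) + 1) * s % n + 1) % n := by
    calc ((j : Int) * s % n + 1 + s) % n = ((j : Int) * s % n + s + 1) % n := by ring_nf
      _ = (((j : Int) * s % n + s) % n + 1) % n := (Int.emod_add_emod _ _ _).symm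
      _ = (((j : Int) + 1) * s % n + 1) % n := by rw [hy]
  set y : Int := ((j : Int) + 1) * s % n with hy'
  have hy0 : 0 ≤ y := Int.emod_nonneg _ (by omega)
  have hylt : y < n := Int.emod_lt_of_pos _ hn
  rw [hx]
  by_cases hcase : y + 1 = n
  · rw [hcase, Int.emod_self, if_pos rfl]
  · have h1 : (y + 1) % n = y + 1 := Int.emod_eq_of_lt (by omega) (by omega)
    rw [h1]
    have : ¬ (y + 1 = 0) := by omega
    simp [this]

-- divisibility characterisation of the cycle length N = n.toNat / gcd (s.toNat) (n.toNat)
lemma cycle_dvd (n s : Int) (hn : 0 < n) (hs : 0 ≤ s) (k : Nat) :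
    ((k : Int) * s % n = 0) ↔ (n.toNat / Nat.gcd s.toNat n.toNat) ∣ k := by
  set g := Nat.gcd s.toNat n.toNat with hg
  have hgn : g ∣ n.toNat := Nat.gcd_dvd_right _ _
  have hgpos : 0 < g := Nat.gcd_pos_of_pos_right _ (by omega)
  obtain ⟨a, hA⟩ := hgn
  obtain ⟨b, hB⟩ := Nat.gcd_dvd_left s.toNat n.toNat
  have hNa : n.toNat / g = a := by rw [hA, Nat.mul_div_cancel_left _ hgpos]
  have hcop : Nat.Coprime a b := by
    have hc := Nat.coprime_div_gcd_div_gcd (m := s.toNat) (n := n.toNat) (by rw [← hg]; exact hgpos)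
    rw [← hg, hA, hB, Nat.mul_div_cancel_left _ hgpos, Nat.mul_div_cancel_left _ hgpos] at hc
    exact hc.symm
  have hsn : s = ((s.toNat : Nat) : Int) := (Int.toNat_of_nonneg hs).symm
  have hnn : n = ((n.toNat : Nat) : Int) := (Int.toNat_of_nonneg (le_of_lt hn)).symm
  have step1 : ((k : Int) * s % n = 0) ↔ n.toNat ∣ k * s.toNat := by
    rw [PySem.Int.emod_eq_zero_iff_dvd, hsn, hnn]
    rw [show ((k : Nat) : Int) * ((s.toNat : Nat) : Int) = ((k * s.toNat : Nat) : Int) by push_cast; ring]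
    exact Int.natCast_dvd_natCast
  rw [step1, hNa, hA, hB]
  constructor
  · intro hdvd
    have h1 : g * a ∣ g * (k * b) := by
      rw [show g * (k * b) = k * (g * b) by ring]
      exact hdvd
    have h2 : a ∣ k * b := (mul_dvd_mul_iff_left (by omega : g ≠ 0)).mp h1
    exact hcop.dvd_of_dvd_mul_right h2
  · intro hdvd
    obtain ⟨c, hc⟩ := hdvd
    exact ⟨c * b, by rw [hc]; ring⟩

-- A's loop, started at position (i*s)%n + 1, emits exactly the positions i..N-1 of the cycle.
lemma loopA_eq (n s : Int) (hn : 0 < n) (hs : 0 ≤ s) (N : Nat)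
    (hN : N = n.toNat / Nat.gcd s.toNat n.toNat) :
    ∀ (fuel i : Nat) (acc : List Int), i < N → N - i ≤ fuel →
      circPathLoopA n (s + 1) fuel ((i : Int) * s % n + 1) acc
        = acc ++ (List.range' i (N - i)).map (fun (j : Nat) => (j : Int) * s % n + 1) := by
  intro fuel
  induction fuel with
  | zero => intro i acc hi hf; omega
  | succ f ih =>
    intro i acc hi hf
    rw [circPathLoopA]
    have harg : (i : Int) * s % n + 1 + (s + 1) - 1 = (i : Int) * s % n + 1 + s := by ring
    rw [harg, PySem.Int.mod_eq_emod_of_pos hn]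
    have hstep := circ_step n s hn i
    rw [hstep]
    by_cases hend : i + 1 = N
    · have hz : (((i + 1 : Nat) : Int) * s % n = 0) := by
        rw [cycle_dvd n s hn hs, ← hN, hend]
      have hz' : ((i : Int) + 1) * s % n + 1 = 1 := by push_cast at hz; omega
      rw [if_pos hz']
      have hrange : N - i = 1 := by omega
      rw [hrange, List.range'_one, List.map_cons, List.map_nil]
    · have hlt : i + 1 < N := by omega
      have hnz : ¬ (((i + 1 : Nat) : Int) * s % n = 0) := by
        rw [cycle_dvd n s hn hs, ← hN]
        intro hdvd
        have := Nat.le_of_dvd (by omega) hdvd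
        omega
      have hnz' : ¬ (((i : Int) + 1) * s % n + 1 = 1) := by
        intro h; apply hnz; push_cast; omega
      rw [if_neg hnz']
      have hcast : ((i : Int) + 1) * s % n + 1 = ((i + 1 : Nat) : Int) * s % n + 1 := by push_cast; ring_nf
      rw [hcast, ih (i + 1) (acc ++ [(i : Int) * s % n + 1]) hlt (by omega)]
      obtain ⟨d, hd⟩ : ∃ d, N - i = d + 1 := ⟨N - i - 1, by omega⟩
      have hd2 : N - (i + 1) = d := by omega
      rw [hd, hd2, List.range'_succ]
      simp

-- ===== VERDICT (by name: the statement is the Claim_ definition above) =====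
theorem circular_path_spec : Claim_equal_circular_path := by
  intro n m _
  unfold Spec_circular_path
  by_cases hneg : n ≤ 0 ∨ m ≤ 0
  · simp only [circular_path, circular_path_alt, if_pos hneg]
  · have hn : 0 < n := by omega
    have hm : 0 < m := by omega
    have hs : 0 ≤ m - 1 := by omega
    have hgpos : 0 < Nat.gcd (m - 1).toNat n.toNat := Nat.gcd_pos_of_pos_right _ (by omega)
    have hgn : Nat.gcd (m - 1).toNat n.toNat ∣ n.toNat := Nat.gcd_dvd_right _ _
    set N : Nat := n.toNat / Nat.gcd (m - 1).toNat n.toNat with hNdef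
    have hNpos : 0 < N := Nat.div_pos (Nat.le_of_dvd (by omega) hgn) hgpos
    have hNle : N ≤ n.toNat := Nat.div_le_self _ _
    have hcount : PySem.Int.floordiv n (pyGcdB n (m - 1)) = (N : Int) := by
      have hfd := PySem.Int.floordiv_natCast n.toNat (Nat.gcd (m - 1).toNat n.toNat)
      rw [Int.toNat_of_nonneg (le_of_lt hn)] at hfd
      rw [pyGcdB_eq (m - 1).toNat n (m - 1) (by omega) hs (le_refl _), hfd]
    have hA := loopA_eq n (m - 1) hn hs N hNdef n.toNat 0 [] hNpos (by omega)
    rw [show ((0 : Nat) : Int) * (m - 1) % n + 1 = 1 by simp,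
      show m - 1 + 1 = m by ring, List.nil_append, Nat.sub_zero,
      show List.range' 0 N = List.range N from List.range_eq_range'.symm] at hA
    simp only [circular_path, circular_path_alt, if_neg hneg]
    rw [hA, hcount, PySem.List.pyRange_zero_nat]
    congr 1
    rw [List.map_map, List.map_map]
    apply List.map_congr_left
    intro k _
    simp only [Function.comp_apply]
    rw [PySem.Int.mod_eq_emod_of_pos hn]
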